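-- pv_equiv track=rewrite | github.com/miroslav-kostov/decorators_lab | reversort_engineering.py | permutation_results
-- ===== SOURCE A (Python) =====
-- from math import inf
--
-- def permutation_results(all_possible_permutations, custom_res):
--     for permutation in all_possible_permutations:
--         current_case = list.copy(permutation)
--         length = len(current_case)
--         done = []
--         res = 0
--         for i in range(length - 1):
--             min_no = inf
--             min_idx = 0
--             for x in range(len(current_case)):
--                 if current_case[x] < min_no:
--                     min_idx = x
--                     min_no = current_case[x]
--             current_case = list(reversed(current_case[:min_idx + 1])) + current_case[min_idx + 1:]
--             res += min_idx + 1
--             done.append(current_case.pop(0))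
--         if res == custom_res:
--             return list(permutation)
-- ===== SOURCE B (Python) =====
-- def permutation_results(all_possible_permutations, custom_res):
--     def cost(lst):
--         if len(lst) < 2:
--             return 0
--         m = lst.index(min(lst))
--         return m + 1 + cost(lst[:m][::-1] + lst[m + 1:])
--     for permutation in all_possible_permutations:
--         if cost(list(permutation)) == custom_res:
--             return list(permutation)
--     return None
-- ===== Notes on version B (the rewrite author's own statement) =====
-- stated objective: simpler
-- what changed: Replaces A's iterative simulation (inf-sentinel index scan for the minimum, prefix reverse, pop into an unused 'done' list, accumulator loop) by a short recursive cost function using min()/index() and slices.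
import Mathlib
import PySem

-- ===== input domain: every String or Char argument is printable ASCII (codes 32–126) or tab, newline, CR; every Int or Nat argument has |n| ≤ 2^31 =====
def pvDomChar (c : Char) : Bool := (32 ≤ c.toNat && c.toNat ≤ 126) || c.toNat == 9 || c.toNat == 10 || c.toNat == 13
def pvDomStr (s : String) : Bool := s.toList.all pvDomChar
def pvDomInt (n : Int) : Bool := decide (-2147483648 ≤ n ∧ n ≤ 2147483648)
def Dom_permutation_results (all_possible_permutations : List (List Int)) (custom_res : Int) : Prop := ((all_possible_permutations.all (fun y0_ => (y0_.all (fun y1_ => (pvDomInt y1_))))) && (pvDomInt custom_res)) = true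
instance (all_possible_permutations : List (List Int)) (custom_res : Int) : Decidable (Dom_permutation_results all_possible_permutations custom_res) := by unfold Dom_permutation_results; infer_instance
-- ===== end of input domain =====

-- B replaces A's iterative Reversort simulation (inf-sentinel min scan, pop into an unused 'done' list) by a short recursive cost function via min/index and slices; same cost, simpler.


-- ===== PORT A =====
-- inner 'for x in range(len(current_case))' min scan; min_no = inf is modelled as 'none'
def pvAFindMin (cc : List Int) : Nat × Option Int :=
  (List.range cc.length).foldl
    (fun st x =>
      match st.2 with
      | none => (x, some (cc.getD x 0))
      | some mv => if cc.getD x 0 < mv then (x, some (cc.getD x 0)) else st)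
    (0, none)

-- one iteration of the outer 'for i in range(length - 1)' body; state = (current_case, done, res)
def pvAStep (st : List Int × List Int × Int) : List Int × List Int × Int :=
  let mi := (pvAFindMin st.1).1
  let cc' := (st.1.take (mi + 1)).reverse ++ st.1.drop (mi + 1)
  let res' := st.2.2 + ((mi : Int) + 1)
  match cc' with
  | [] => ([], st.2.1, res')        -- unreachable: Python's pop(0) never sees an empty list here
  | h :: t => (t, st.2.1 ++ [h], res')

def permutation_results (all_possible_permutations : List (List Int)) (custom_res : Int) : Option (List Int) :=
  match all_possible_permutations with
  | [] => none
  | p :: rest =>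
    let fin := (List.range (p.length - 1)).foldl (fun st _ => pvAStep st) (p, ([] : List Int), (0 : Int))
    if fin.2.2 = custom_res then some p else permutation_results rest custom_res

-- ===== PORT B =====
-- cost(lst): m = lst.index(min(lst)); m+1 + cost(lst[:m][::-1] + lst[m+1:])
def pvBCost (lst : List Int) : Int :=
  if lst.length < 2 then 0
  else
    match PySem.List.min? lst (fun y => y) with
    | none => 0          -- unreachable: lst is nonempty here
    | some mn =>
      match h2 : PySem.List.index? lst mn with
      | none => 0        -- unreachable: mn ∈ lst
      | some m =>
        ((m : Int) + 1) + pvBCost ((lst.take m).reverse ++ lst.drop (m + 1))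
termination_by lst.length
decreasing_by
  have hm := PySem.List.getElem_of_index?_eq_some h2
  obtain ⟨hk, -, -⟩ := hm
  simp only [List.length_append, List.length_reverse, List.length_take, List.length_drop]
  omega

def permutation_results_alt (all_possible_permutations : List (List Int)) (custom_res : Int) : Option (List Int) :=
  match all_possible_permutations with
  | [] => none
  | p :: rest =>
    if pvBCost p = custom_res then some p else permutation_results_alt rest custom_res

-- ===== PRECONDITION & SPEC =====
def Spec_permutation_results (all_possible_permutations : List (List Int)) (custom_res : Int) (out : Option (List Int)) : Prop := out = permutation_results_alt all_possible_permutations custom_res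
instance (all_possible_permutations : List (List Int)) (custom_res : Int) (out : Option (List Int)) : Decidable (Spec_permutation_results all_possible_permutations custom_res out) := by unfold Spec_permutation_results; infer_instance

-- ===== CLAIM (what is proved, stated in full; the proofs are below) =====
def Claim_equal_permutation_results : Prop := ∀ (all_possible_permutations : List (List Int)) (custom_res : Int), Dom_permutation_results all_possible_permutations custom_res → Spec_permutation_results all_possible_permutations custom_res (permutation_results all_possible_permutations custom_res)

-- ===== LEMMAS AND PROOFS =====

-- structural recursion describing A's min scan from index k onward, state (i, v)
def fmin2 : List Int → Nat → Nat → Int → Nat × Int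
  | [], _, i, v => (i, v)
  | x :: xs, k, i, v => if x < v then fmin2 xs (k + 1) k x else fmin2 xs (k + 1) i v

theorem fm_go (cc : List Int) : ∀ (l : List Int) (k i : Nat) (v : Int), cc.drop k = l →
    (List.range' k l.length).foldl
      (fun st x =>
        match st.2 with
        | none => (x, some (cc.getD x 0))
        | some mv => if cc.getD x 0 < mv then (x, some (cc.getD x 0)) else st)
      (i, some v)
    = ((fmin2 l k i v).1, some (fmin2 l k i v).2) := by
  intro l
  induction l with
  | nil => intro k i v h; simp [fmin2]
  | cons x xs ih =>
    intro k i v h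
    have hk : k < cc.length := by
      by_contra hk
      simp [List.drop_eq_nil_of_le (Nat.le_of_not_lt hk)] at h
    have hx : cc.getD k 0 = x := by
      have h0 : (cc.drop k)[0]'(by simp [h]) = x := by simp [h]
      rw [List.getElem_drop] at h0
      simp only [Nat.add_zero] at h0
      simp [List.getD_eq_getElem?_getD, List.getElem?_eq_getElem hk, h0]
    have hdrop : cc.drop (k + 1) = xs := by
      have : (cc.drop k).drop 1 = xs := by simp [h]
      simpa [List.drop_drop, Nat.add_comm] using this
    rw [show (x :: xs).length = xs.length + 1 from rfl, List.range'_succ, List.foldl_cons]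
    simp only [hx]
    by_cases hlt : x < v
    · rw [if_pos hlt, ih (k+1) k x hdrop]
      simp [fmin2, hlt]
    · rw [if_neg hlt, ih (k+1) i v hdrop]
      simp [fmin2, hlt]

theorem pvAFindMin_eq (c : Int) (t : List Int) :
    pvAFindMin (c :: t) = ((fmin2 t 1 0 c).1, some (fmin2 t 1 0 c).2) := by
  unfold pvAFindMin
  rw [show (c :: t).length = t.length + 1 from rfl, List.range_eq_range', List.range'_succ,
    List.foldl_cons]
  have h0 : ((c :: t).getD 0 0) = c := rfl
  have := fm_go (c :: t) t 1 0 c (by simp)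
  simpa [h0] using this

theorem fmin2_val : ∀ (l : List Int) (k i : Nat) (v : Int), (fmin2 l k i v).2 = l.foldl min v := by
  intro l
  induction l with
  | nil => intro k i v; simp [fmin2]
  | cons x xs ih =>
    intro k i v
    by_cases hlt : x < v
    · have : min v x = x := by omega
      simp [fmin2, hlt, ih, this]
    · have : min v x = v := by omega
      simp [fmin2, hlt, ih, this]

theorem fmin2_spec : ∀ (l pre : List Int) (i : Nat) (v : Int),
    i < pre.length → pre.getD i 0 = v → v ∉ pre.take i → (∀ y ∈ pre, v ≤ y) →
    ∃ p s, pre ++ l = p ++ (fmin2 l pre.length i v).2 :: s ∧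
      p.length = (fmin2 l pre.length i v).1 ∧ (fmin2 l pre.length i v).2 ∉ p := by
  intro l
  induction l with
  | nil =>
    intro pre i v hi hget hnot _
    refine ⟨pre.take i, pre.drop (i + 1), ?_, ?_, ?_⟩
    · have hv : pre[i]'hi = v := by
        simpa [List.getD_eq_getElem?_getD, List.getElem?_eq_getElem hi] using hget
      have : pre.drop i = v :: pre.drop (i + 1) := by
        rw [List.drop_eq_getElem_cons hi, hv]
      simp [fmin2]
      calc pre = pre.take i ++ pre.drop i := (List.take_append_drop i pre).symm
        _ = pre.take i ++ v :: pre.drop (i + 1) := by rw [this]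
    · simp [fmin2, List.length_take, Nat.le_of_lt hi]
    · simpa [fmin2] using hnot
  | cons x xs ih =>
    intro pre i v hi hget hnot hmin
    by_cases hlt : x < v
    · have h1 : pre.length < (pre ++ [x]).length := by simp
      have h2 : (pre ++ [x]).getD pre.length 0 = x := by
        simp [List.getD_eq_getElem?_getD]
      have h3 : x ∉ (pre ++ [x]).take pre.length := by
        rw [List.take_left]
        intro hx
        exact absurd (hmin x hx) (by omega)
      have h4 : ∀ y ∈ pre ++ [x], x ≤ y := by
        intro y hy
        rcases List.mem_append.mp hy with hy | hy
        · exact le_of_lt (lt_of_lt_of_le hlt (hmin y hy))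
        · simp at hy; omega
      have := ih (pre ++ [x]) pre.length x h1 h2 h3 h4
      simpa [fmin2, hlt, List.append_assoc] using this
    · have h1 : i < (pre ++ [x]).length := by simp; omega
      have h2 : (pre ++ [x]).getD i 0 = v := by
        rw [List.getD_eq_getElem?_getD, List.getElem?_append_left hi,
          ← List.getD_eq_getElem?_getD, hget]
      have h3 : v ∉ (pre ++ [x]).take i := by
        rwa [List.take_append_of_le_length (Nat.le_of_lt hi)]
      have h4 : ∀ y ∈ pre ++ [x], v ≤ y := by
        intro y hy
        rcases List.mem_append.mp hy with hy | hy
        · exact hmin y hy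
        · simp at hy; omega
      have := ih (pre ++ [x]) i v h1 h2 h3 h4
      simpa [fmin2, hlt, List.append_assoc] using this

theorem findMin_char (c : Int) (t : List Int) :
    PySem.List.index? (c :: t) (fmin2 t 1 0 c).2 = some (fmin2 t 1 0 c).1 := by
  have h := fmin2_spec t [c] 0 c (by simp) rfl (by simp) (by intro y hy; simp at hy; omega)
  obtain ⟨p, s, hdec, hlen, hnot⟩ := h
  rw [PySem.List.index?_eq_some_iff]
  exact ⟨p, s, by simpa using hdec, hlen, hnot⟩

theorem pvBCost_eq (lst : List Int) (h : ¬ lst.length < 2) (mn : Int) (m : Nat)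
    (h1 : PySem.List.min? lst (fun y => y) = some mn) (h2 : PySem.List.index? lst mn = some m) :
    pvBCost lst = ((m : Int) + 1) + pvBCost ((lst.take m).reverse ++ lst.drop (m + 1)) := by
  rw [pvBCost.eq_def]
  rw [if_neg h]
  split
  · rename_i heq; rw [heq] at h1; exact absurd h1 (by simp)
  · rename_i mn' heq
    rw [heq] at h1; injection h1 with h1; subst h1
    split
    · rename_i heq2; rw [heq2] at h2; exact absurd h2 (by simp)
    · rename_i m' heq2
      rw [heq2] at h2; injection h2 with h2; subst h2
      rfl

theorem foldl_const {α β : Type} (g : α → α) : ∀ (l : List β) (init : α),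
    l.foldl (fun s _ => g s) init = g^[l.length] init := by
  intro l
  induction l with
  | nil => intro init; simp
  | cons x xs ih =>
    intro init
    simp [List.foldl_cons, ih, Function.iterate_succ_apply]

theorem main_M : ∀ (n : Nat) (cc done : List Int) (res : Int), cc.length = n + 1 →
    (pvAStep^[n] (cc, done, res)).2.2 = res + pvBCost cc := by
  intro n
  induction n with
  | zero =>
    intro cc done res hlen
    have : pvBCost cc = 0 := by rw [pvBCost.eq_def, if_pos (by omega)]
    simp [this]
  | succ n ih =>
    intro cc done res hlen
    match cc, hlen with
    | c :: t, hlen =>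
      have hidx := findMin_char c t
      obtain ⟨hmlt, -, -⟩ := PySem.List.getElem_of_index?_eq_some hidx
      set m := (fmin2 t 1 0 c).1 with hm
      have hmin : PySem.List.min? (c :: t) (fun y => y) = some (fmin2 t 1 0 c).2 := by
        rw [PySem.List.min?_id_cons, fmin2_val]
      have htake : (c :: t).take (m + 1) = (c :: t).take m ++ [(c :: t)[m]'hmlt] := by
        rw [List.take_add_one, List.getElem?_eq_getElem hmlt]
        rfl
      have hstep : pvAStep (c :: t, done, res)
          = (((c :: t).take m).reverse ++ (c :: t).drop (m + 1),
             done ++ [(c :: t)[m]'hmlt], res + ((m : Int) + 1)) := by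
        unfold pvAStep
        rw [pvAFindMin_eq]
        simp only [← hm, htake, List.reverse_append, List.reverse_singleton,
          List.singleton_append]
        rfl
      have hcost : pvBCost (c :: t)
          = ((m : Int) + 1) + pvBCost (((c :: t).take m).reverse ++ (c :: t).drop (m + 1)) :=
        pvBCost_eq (c :: t) (by simp only [List.length_cons] at hlen ⊢; omega) _ m hmin hidx
      have hlen' : (((c :: t).take m).reverse ++ (c :: t).drop (m + 1)).length = n + 1 := by
        simp only [List.length_append, List.length_reverse, List.length_take, List.length_drop,
          List.length_cons] at hmlt hlen ⊢
        rw [Nat.min_eq_left (by omega)]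
        omega
      rw [Function.iterate_succ_apply, hstep,
        ih _ _ _ hlen', hcost]
      ring

theorem cost_eq (p : List Int) :
    ((List.range (p.length - 1)).foldl (fun st _ => pvAStep st) (p, ([] : List Int), (0 : Int))).2.2
      = pvBCost p := by
  match p with
  | [] =>
    have : pvBCost ([] : List Int) = 0 := by rw [pvBCost.eq_def, if_pos (by simp)]
    simp [this]
  | c :: t =>
    have hn : (c :: t).length - 1 = t.length := by simp
    rw [hn, foldl_const pvAStep, List.length_range,
      main_M t.length (c :: t) [] 0 (by simp)]
    simp

-- ===== VERDICT (by name: the statement is the Claim_ definition above) =====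
theorem results_eq : ∀ (ps : List (List Int)) (r : Int),
    permutation_results ps r = permutation_results_alt ps r := by
  intro ps
  induction ps with
  | nil => intro r; rfl
  | cons p rest ih =>
    intro r
    simp only [permutation_results, permutation_results_alt, cost_eq p, ih]

theorem permutation_results_spec : Claim_equal_permutation_results := by
  intro ps r _
  unfold Spec_permutation_results
  exact results_eq ps r
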